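-- pv_equiv track=rewrite | github.com/Janadasroor/VioAVR | scripts/gen_device.py | get_pad_info
-- ===== SOURCE A (Python) =====
-- def hx(v):
--     if v is None or v == "": return "0x0U"
--     if isinstance(v, str):
--         if v.endswith('U'): v = v[:-1]
--         v = int(v, 0)
--     return f"{hex(v).upper().replace('X', 'x')}U"
--
-- def get_pad_info(port_map, periph, sig_name, reg_type='PORT'):
--     for sig in periph.get('signals', []):
--         full_sig = (sig.get('group') or '') + (sig.get('index') or '')
--         if full_sig == sig_name:
--             pad = sig.get('pad', '')
--             if pad and pad.startswith('P'):
--                 port_char = pad[1]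
--                 bit_index = int(pad[2:]) if pad[2:].isdigit() else 0
--                 port_data = port_map.get(port_char, {})
--                 addr = port_data.get(reg_type, 0)
--                 return hx(addr), bit_index
--
--     sig_no_digit = "".join(c for c in sig_name if not c.isdigit())
--     if sig_no_digit != sig_name:
--         for sig in periph.get('signals', []):
--             full_sig = (sig.get('group') or '') + (sig.get('index') or '')
--             if full_sig == sig_no_digit:
--                 pad = sig.get('pad', '')
--                 if pad and pad.startswith('P'):
--                     port_char = pad[1]
--                     bit_index = int(pad[2:]) if pad[2:].isdigit() else 0
--                     port_data = port_map.get(port_char, {})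
--                     addr = port_data.get(reg_type, 0)
--                     return hx(addr), bit_index
--
--     return "0x0U", 0
-- ===== SOURCE B (Python) =====
-- # B: single pass over the signals with two first-hit trackers (direct name and
-- # digit-stripped name, computed up front); the winning signal's pad is decoded
-- # only once, after the scan.  Same hx formatting as A.
--
-- def hx(v):
--     if v is None or v == "": return "0x0U"
--     if isinstance(v, str):
--         if v.endswith('U'): v = v[:-1]
--         v = int(v, 0)
--     return f"{hex(v).upper().replace('X', 'x')}U"
--
-- def get_pad_info(port_map, periph, sig_name, reg_type='PORT'):
--     sig_no_digit = "".join(c for c in sig_name if not c.isdigit())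
--     hit = hit_nd = None
--     for sig in periph.get('signals', []):
--         pad = sig.get('pad', '')
--         if pad.startswith('P'):
--             full = (sig.get('group') or '') + (sig.get('index') or '')
--             if hit is None and full == sig_name:
--                 hit = sig
--             if hit_nd is None and full == sig_no_digit:
--                 hit_nd = sig
--     chosen = hit if hit is not None else (hit_nd if sig_no_digit != sig_name else None)
--     if chosen is None:
--         return "0x0U", 0
--     pad = chosen.get('pad', '')
--     bit_index = int(pad[2:]) if pad[2:].isdigit() else 0
--     addr = port_map.get(pad[1], {}).get(reg_type, 0)
--     return hx(addr), bit_index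
-- ===== Notes on version B (the rewrite author's own statement) =====
-- stated objective: alternative
-- what changed: A scans the signal list once per looked-up name (direct name, then the digit-stripped name); B computes the stripped name up front and makes a single pass with two first-hit trackers, decoding only the winning signal's pad after the scan.
import Mathlib
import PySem

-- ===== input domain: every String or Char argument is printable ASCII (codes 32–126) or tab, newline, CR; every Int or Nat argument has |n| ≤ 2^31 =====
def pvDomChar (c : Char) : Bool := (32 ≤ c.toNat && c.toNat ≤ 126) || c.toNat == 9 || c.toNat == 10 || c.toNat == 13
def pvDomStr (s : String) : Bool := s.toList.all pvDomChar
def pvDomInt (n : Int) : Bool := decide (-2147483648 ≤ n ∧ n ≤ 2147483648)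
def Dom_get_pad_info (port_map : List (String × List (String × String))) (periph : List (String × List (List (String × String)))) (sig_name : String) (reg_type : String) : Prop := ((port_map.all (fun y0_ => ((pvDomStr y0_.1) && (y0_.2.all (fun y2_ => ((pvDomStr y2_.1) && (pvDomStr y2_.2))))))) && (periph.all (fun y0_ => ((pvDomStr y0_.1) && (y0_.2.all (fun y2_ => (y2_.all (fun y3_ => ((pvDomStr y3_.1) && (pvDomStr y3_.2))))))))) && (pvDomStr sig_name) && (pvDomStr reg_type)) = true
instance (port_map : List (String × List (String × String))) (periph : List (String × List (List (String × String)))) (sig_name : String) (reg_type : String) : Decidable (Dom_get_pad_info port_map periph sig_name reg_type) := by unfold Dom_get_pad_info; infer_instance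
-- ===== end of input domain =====

-- B replaces A's two per-name scans of the signal list by ONE pass holding two
-- first-hit trackers (the direct name and the digit-stripped name, computed up
-- front); only the winning signal is decoded, after the scan (objective: alternative).

-- ===== shared helpers (the Python module's hx and field reads used by both programs) =====

-- hex digits of n, uppercase (hex(v).upper().replace('X','x') in hx)
def pvHexNatAux : Nat → List Char → List Char
  | 0, acc => acc
  | n+1, acc =>
    pvHexNatAux ((n+1) / 16) ("0123456789ABCDEF".toList.getD ((n+1) % 16) '0' :: acc)
  decreasing_by exact Nat.div_lt_self (Nat.succ_pos n) (by norm_num)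

def pvHexNat (n : Nat) : String := if n = 0 then "0" else String.ofList (pvHexNatAux n [])

-- f"{hex(v).upper().replace('X','x')}U" for an int v
def pvHexInt (n : Int) : String := (if n < 0 then "-0x" ++ pvHexNat n.natAbs else "0x" ++ pvHexNat n.natAbs) ++ "U"

-- hx(v) where v is the looked-up addr: none = the absent-key default 0, some s = a string;
-- result none = hx raises ValueError (int(v, 0) fails)
def pvHx : Option String → Option String
  | none => some "0x0U"
  | some v =>
    if v = "" then some "0x0U"
    else
      let v' := if PySem.Str.endswith v "U" then PySem.Str.slice v none (some (-1)) else v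
      (PySem.Int.ofStrBase? v' 0).map pvHexInt

-- (sig.get('group') or '') + (sig.get('index') or '')   ('x or ""' = 'x' on strings, '"" or ""' = '')
def pvFullSig (sig : List (String × String)) : String :=
  (PySem.Dict.mk sig).getD "group" "" ++ (PySem.Dict.mk sig).getD "index" ""

-- sig.get('pad', '')
def pvPad (sig : List (String × String)) : String := (PySem.Dict.mk sig).getD "pad" ""

-- "".join(c for c in s if not c.isdigit())
def pvStripDigits (s : String) : String := String.ofList (s.toList.filter (fun c => !PySem.Chars.isdigit c))

-- ===== PORT A =====
-- the raw data A reads off a P-pad signal: (port_map.get(pad[1], {}).get(reg_type), bit_index)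
def pvRawEntry (port_map : List (String × List (String × String))) (reg_type : String) (pad : String) : Option String × Int :=
  let c := (PySem.Str.pyGet? pad 1).getD 'P'   -- pad[1]; in range whenever A's guards hold and pad ≠ "P"
  let addr := ((PySem.Dict.mk port_map).get? (String.singleton c)).bind
                (fun d => (PySem.Dict.mk d).get? reg_type)
  let tail := PySem.Str.slice pad (some 2) none
  let bit : Int := if PySem.Str.strIsdigit tail then (PySem.Int.ofStr? tail).getD 0 else 0
  (addr, bit)

-- (hx(addr), bit_index); the .getD arm is the ValueError case, excluded by Pre_
def pvFinish (e : Option String × Int) : String × Int := ((pvHx e.1).getD "<ValueError>", e.2)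

-- A's loop body: scan the signals for the first one matching `name` whose pad starts with 'P'
def pvALoop (port_map : List (String × List (String × String))) (reg_type : String) (name : String) :
    List (List (String × String)) → Option (String × Int)
  | [] => none
  | sig :: rest =>
    if pvFullSig sig = name then
      if pvPad sig ≠ "" ∧ PySem.Str.startswith (pvPad sig) "P" = true then
        some (pvFinish (pvRawEntry port_map reg_type (pvPad sig)))
      else pvALoop port_map reg_type name rest
    else pvALoop port_map reg_type name rest

def get_pad_info (port_map : List (String × List (String × String))) (periph : List (String × List (List (String × String)))) (sig_name : String) (reg_type : String) : String × Int :=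
  let sigs := (PySem.Dict.mk periph).getD "signals" []
  match pvALoop port_map reg_type sig_name sigs with
  | some r => r
  | none =>
    let nd := pvStripDigits sig_name
    if nd ≠ sig_name then
      match pvALoop port_map reg_type nd sigs with
      | some r => r
      | none => ("0x0U", 0)
    else ("0x0U", 0)

-- ===== PORT B =====
-- the loop body of B's single pass: track the first P-pad signal named n1 and the first named n2
def pvBStep (n1 n2 : String)
    (st : Option (List (String × String)) × Option (List (String × String)))
    (sig : List (String × String)) :
    Option (List (String × String)) × Option (List (String × String)) :=
  if PySem.Str.startswith (pvPad sig) "P" = true then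
    ((if st.1 = none ∧ pvFullSig sig = n1 then some sig else st.1),
     (if st.2 = none ∧ pvFullSig sig = n2 then some sig else st.2))
  else st

-- decoding of the winning signal, done once after the scan (Source B's last four lines)
def pvDecode (port_map : List (String × List (String × String))) (reg_type : String)
    (s : List (String × String)) : String × Int :=
  let pad := pvPad s
  let bit : Int := if PySem.Str.strIsdigit (PySem.Str.slice pad (some 2) none)
                   then (PySem.Int.ofStr? (PySem.Str.slice pad (some 2) none)).getD 0 else 0
  let addr : Option String :=
    match PySem.Str.pyGet? pad 1 with
    | none => none    -- pad[1] IndexError in Python; Pre_ excludes reaching this arm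
    | some c => ((PySem.Dict.mk port_map).get? (String.singleton c)).bind
                  (fun d => (PySem.Dict.mk d).get? reg_type)
  ((pvHx addr).getD "<ValueError>", bit)

def get_pad_info_alt (port_map : List (String × List (String × String))) (periph : List (String × List (List (String × String)))) (sig_name : String) (reg_type : String) : String × Int :=
  let nd := pvStripDigits sig_name
  let st := ((PySem.Dict.mk periph).getD "signals" []).foldl (pvBStep sig_name nd) (none, none)
  let chosen : Option (List (String × String)) :=
    match st.1 with
    | some s => some s
    | none => if nd ≠ sig_name then st.2 else none
  match chosen with
  | none => ("0x0U", 0)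
  | some s => pvDecode port_map reg_type s

-- ===== PRECONDITION & SPEC =====
-- the first signal in `sigs` whose full name is `name` and whose pad starts with 'P'
-- (exactly the signal at which A's scan for `name` stops)
def pvFirstHit (name : String) (sigs : List (List (String × String))) : Option (List (String × String)) :=
  (sigs.filter (fun s => pvFullSig s == name && PySem.Str.startswith (pvPad s) "P")).head?

-- hx(addr) returns normally: absent key or "" give "0x0U", a string must parse under int(·, 0) after an optional trailing 'U'
def pvAddrParses : Option String → Bool
  | none => true
  | some v => v == "" || (PySem.Int.ofStrBase? (if PySem.Str.endswith v "U" then PySem.Str.slice v none (some (-1)) else v) 0).isSome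

-- the hit signal (if any) raises nothing: pad is not bare "P" (pad[1] IndexError) and its addr parses (hx ValueError)
def pvHitOK (port_map : List (String × List (String × String))) (reg_type : String) :
    Option (List (String × String)) → Bool
  | none => true
  | some s => (pvPad s != "P") && pvAddrParses (pvRawEntry port_map reg_type (pvPad s)).1

-- Pre_ excludes exactly the inputs where A raises: the one signal A's scan stops at (first
-- P-pad match of sig_name; or, when there is none, of the digit-stripped name) must have a
-- pad other than bare "P" and an addr string int(·, 0) accepts.  Signals A never reaches are
-- unconstrained.
def Pre_get_pad_info (port_map : List (String × List (String × String))) (periph : List (String × List (List (String × String)))) (sig_name : String) (reg_type : String) : Prop :=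
  pvHitOK port_map reg_type (pvFirstHit sig_name ((PySem.Dict.mk periph).getD "signals" [])) = true ∧
  (pvFirstHit sig_name ((PySem.Dict.mk periph).getD "signals" []) = none →
    pvStripDigits sig_name ≠ sig_name →
    pvHitOK port_map reg_type (pvFirstHit (pvStripDigits sig_name) ((PySem.Dict.mk periph).getD "signals" [])) = true)
instance (port_map : List (String × List (String × String))) (periph : List (String × List (List (String × String)))) (sig_name : String) (reg_type : String) : Decidable (Pre_get_pad_info port_map periph sig_name reg_type) := by unfold Pre_get_pad_info; infer_instance

def pvWitness_get_pad_info : (List (String × List (String × String))) × (List (String × List (List (String × String)))) × String × String :=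
  ([("A", [("PORT", "0x20U")])], [("signals", [[("group", "TX"), ("pad", "PA3")]])], "TX", "PORT")

def Spec_get_pad_info (port_map : List (String × List (String × String))) (periph : List (String × List (List (String × String)))) (sig_name : String) (reg_type : String) (out : String × Int) : Prop := out = get_pad_info_alt port_map periph sig_name reg_type
instance (port_map : List (String × List (String × String))) (periph : List (String × List (List (String × String)))) (sig_name : String) (reg_type : String) (out : String × Int) : Decidable (Spec_get_pad_info port_map periph sig_name reg_type out) := by unfold Spec_get_pad_info; infer_instance

-- ===== CLAIM (what is proved, stated in full; the proofs are below) =====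
def Claim_equal_get_pad_info : Prop := ∀ (port_map : List (String × List (String × String))) (periph : List (String × List (List (String × String)))) (sig_name : String) (reg_type : String), Dom_get_pad_info port_map periph sig_name reg_type → Pre_get_pad_info port_map periph sig_name reg_type → Spec_get_pad_info port_map periph sig_name reg_type (get_pad_info port_map periph sig_name reg_type)

-- ===== LEMMAS AND PROOFS =====

-- if pad starts with 'P' and is not exactly "P", it has at least two characters
theorem pvPad_two_le {pad : String} (hs : PySem.Str.startswith pad "P" = true) (hne : pad ≠ "P") :
    2 ≤ PySem.Str.len pad := by
  rw [PySem.Str.startswith_eq, PySem.Chars.startswith_iff] at hs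
  obtain ⟨t, ht⟩ := hs
  rw [PySem.Str.len_eq]
  have : pad.toList = 'P' :: t := by simpa using ht.symm
  cases t with
  | nil =>
    exfalso; apply hne
    have h3 := congrArg String.ofList this
    simpa using h3
  | cons c t' => simp [this]; omega

theorem pvPad_ne_empty {pad : String} (hs : PySem.Str.startswith pad "P" = true) : pad ≠ "" := by
  rw [PySem.Str.startswith_eq, PySem.Chars.startswith_iff] at hs
  obtain ⟨t, ht⟩ := hs
  intro h
  rw [h] at ht
  simp at ht

-- cons-step facts about pvFirstHit (the first-match characterization both scans reduce to)
theorem pvFirstHit_cons_pos {name : String} {sig : List (String × String)}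
    (rest : List (List (String × String)))
    (hf : pvFullSig sig = name) (hs : PySem.Str.startswith (pvPad sig) "P" = true) :
    pvFirstHit name (sig :: rest) = some sig := by
  unfold pvFirstHit
  simp only [List.filter_cons]
  rw [if_pos (by rw [Bool.and_eq_true]; exact ⟨beq_iff_eq.mpr hf, hs⟩)]
  rfl

theorem pvFirstHit_cons_neg {name : String} {sig : List (String × String)}
    (rest : List (List (String × String)))
    (h : pvFullSig sig ≠ name ∨ PySem.Str.startswith (pvPad sig) "P" = false) :
    pvFirstHit name (sig :: rest) = pvFirstHit name rest := by
  unfold pvFirstHit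
  simp only [List.filter_cons]
  rw [if_neg]
  intro hp
  rw [Bool.and_eq_true, beq_iff_eq] at hp
  cases h with
  | inl h => exact h hp.1
  | inr h => exact absurd (h ▸ hp.2) Bool.false_ne_true

-- A's scan IS "first filter hit, decoded": pvALoop = map finish∘raw over pvFirstHit
theorem pvALoop_eq_firstHit (port_map : List (String × List (String × String))) (reg_type name : String)
    (sigs : List (List (String × String))) :
    pvALoop port_map reg_type name sigs =
      (pvFirstHit name sigs).map (fun s => pvFinish (pvRawEntry port_map reg_type (pvPad s))) := by
  induction sigs with
  | nil => simp [pvALoop, pvFirstHit]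
  | cons sig rest ih =>
    simp only [pvALoop]
    by_cases hfull : pvFullSig sig = name
    · by_cases hs : PySem.Str.startswith (pvPad sig) "P" = true
      · rw [if_pos hfull, if_pos ⟨pvPad_ne_empty hs, hs⟩, pvFirstHit_cons_pos rest hfull hs]
        rfl
      · rw [if_pos hfull, if_neg (fun h => hs h.2),
            pvFirstHit_cons_neg rest (Or.inr (Bool.eq_false_iff.mpr hs)), ih]
    · rw [if_neg hfull, pvFirstHit_cons_neg rest (Or.inl hfull), ih]

-- B's scan: folding pvBStep records, per component, the accumulator's hit if present, else the first filter hit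
theorem pvBStep_foldl (n1 n2 : String)
    (sigs : List (List (String × String)))
    (st : Option (List (String × String)) × Option (List (String × String))) :
    sigs.foldl (pvBStep n1 n2) st =
      (st.1.or (pvFirstHit n1 sigs), st.2.or (pvFirstHit n2 sigs)) := by
  induction sigs generalizing st with
  | nil => simp [pvFirstHit]
  | cons sig rest ih =>
    obtain ⟨s1, s2⟩ := st
    rw [List.foldl_cons, ih]
    by_cases hs : PySem.Str.startswith (pvPad sig) "P" = true
    · simp only [pvBStep, if_pos hs]
      refine congrArg₂ Prod.mk ?_ ?_
      · cases s1 with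
        | some a => simp
        | none =>
          by_cases hf : pvFullSig sig = n1
          · rw [if_pos ⟨rfl, hf⟩, pvFirstHit_cons_pos rest hf hs]
            simp
          · rw [if_neg (fun h => hf h.2), pvFirstHit_cons_neg rest (Or.inl hf)]
      · cases s2 with
        | some a => simp
        | none =>
          by_cases hf : pvFullSig sig = n2
          · rw [if_pos ⟨rfl, hf⟩, pvFirstHit_cons_pos rest hf hs]
            simp
          · rw [if_neg (fun h => hf h.2), pvFirstHit_cons_neg rest (Or.inl hf)]
    · simp only [pvBStep, if_neg hs]
      rw [pvFirstHit_cons_neg rest (Or.inr (Bool.eq_false_iff.mpr hs)),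
          pvFirstHit_cons_neg rest (Or.inr (Bool.eq_false_iff.mpr hs))]

-- the element pvFirstHit returns satisfies the filter's predicate
theorem pvFirstHit_prop {name : String} {sigs : List (List (String × String))}
    {s : List (String × String)} (h : pvFirstHit name sigs = some s) :
    pvFullSig s = name ∧ PySem.Str.startswith (pvPad s) "P" = true := by
  unfold pvFirstHit at h
  cases hf : sigs.filter (fun s => pvFullSig s == name && PySem.Str.startswith (pvPad s) "P") with
  | nil => rw [hf] at h; cases h
  | cons a t =>
    rw [hf] at h
    have ha : a = s := by simpa using h
    have hmem : s ∈ sigs.filter (fun s => pvFullSig s == name && PySem.Str.startswith (pvPad s) "P") := by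
      rw [hf, ha]; exact List.mem_cons_self
    have hp := (List.mem_filter.mp hmem).2
    rw [Bool.and_eq_true, beq_iff_eq] at hp
    exact hp

-- B's decode equals A's finish∘raw whenever the pad has at least two characters
theorem pvDecode_eq (port_map : List (String × List (String × String))) (reg_type : String)
    (s : List (String × String)) (h2 : 2 ≤ PySem.Str.len (pvPad s)) :
    pvDecode port_map reg_type s = pvFinish (pvRawEntry port_map reg_type (pvPad s)) := by
  obtain ⟨c, hc⟩ : ∃ c, PySem.Str.pyGet? (pvPad s) 1 = some c := by
    rw [PySem.Str.len_eq] at h2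
    cases hl : (pvPad s).toList with
    | nil => rw [hl] at h2; simp at h2
    | cons a t =>
      cases t with
      | nil => rw [hl] at h2; simp at h2
      | cons b t' =>
        refine ⟨b, ?_⟩
        simp [PySem.Str.pyGet?, hl]
  simp only [pvDecode, pvFinish, pvRawEntry, hc, Option.getD_some]

-- ===== VERDICT (by name: the statement is the Claim_ definition above) =====
theorem get_pad_info_spec : Claim_equal_get_pad_info := by
  intro port_map periph sig_name reg_type _hDom hPre
  obtain ⟨hPre1, hPre2⟩ := hPre
  unfold Spec_get_pad_info
  simp only [get_pad_info, get_pad_info_alt, pvBStep_foldl, pvALoop_eq_firstHit, Option.none_or]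
  cases h1 : pvFirstHit sig_name ((PySem.Dict.mk periph).getD "signals" []) with
  | some s =>
    obtain ⟨_, hstart⟩ := pvFirstHit_prop h1
    rw [h1] at hPre1
    simp only [pvHitOK] at hPre1
    have hneP : pvPad s ≠ "P" := by
      intro h
      rw [h] at hPre1
      simp at hPre1
    simp only [Option.map_some]
    exact (pvDecode_eq port_map reg_type s (pvPad_two_le hstart hneP)).symm
  | none =>
    simp only [Option.map_none]
    by_cases hne : pvStripDigits sig_name ≠ sig_name
    · cases h2 : pvFirstHit (pvStripDigits sig_name) ((PySem.Dict.mk periph).getD "signals" []) with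
      | some s =>
        obtain ⟨_, hstart⟩ := pvFirstHit_prop h2
        have hok := hPre2 h1 hne
        rw [h2] at hok
        simp only [pvHitOK] at hok
        have hneP : pvPad s ≠ "P" := by
          intro h
          rw [h] at hok
          simp at hok
        simp only [Option.map_some, if_pos hne]
        exact (pvDecode_eq port_map reg_type s (pvPad_two_le hstart hneP)).symm
      | none => simp [hne]
    · simp only [ne_eq, not_not] at hne
      simp [hne]
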